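-- pv_equiv track=rewrite | github.com/ccruz0/crypto-2.0 | backend/app/utils/symbols.py | normalize_symbol_for_exchange
-- ===== SOURCE A (Python) =====
-- from typing import Optional
--
-- def normalize_symbol_for_exchange(symbol: Optional[str]) -> str:
--     """Normalize symbol to exchange-friendly format (e.g., BTC/USDT -> BTC_USDT)."""
--     if not symbol:
--         return ""
--     normalized = (
--         symbol.strip()
--         .upper()
--         .replace("/", "_")
--         .replace("-", "_")
--         .replace(" ", "")
--     )
--     # Collapse repeated underscores
--     while "__" in normalized:
--         normalized = normalized.replace("__", "_")
--     return normalized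
-- ===== SOURCE B (Python) =====
-- from typing import Optional
--
-- def normalize_symbol_for_exchange(symbol: Optional[str]) -> str:
--     """Single left-to-right pass: map '/'/'-' to '_', drop spaces, collapse runs of '_' inline."""
--     if not symbol:
--         return ""
--     out = []
--     prev_underscore = False
--     for c in symbol.strip().upper():
--         if c == " ":
--             continue
--         if c in "/-":
--             c = "_"
--         if c == "_" and prev_underscore:
--             continue
--         out.append(c)
--         prev_underscore = (c == "_")
--     return "".join(out)
-- ===== Notes on version B (the rewrite author's own statement) =====
-- stated objective: simpler
-- what changed: Replaces A's four sequential replace passes plus a while-loop that repeatedly rescans and rewrites doubled underscores with a single left-to-right pass that maps the two separator characters to underscore, drops spaces, and collapses underscore runs inline using a previous-character flag.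
import Mathlib
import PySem

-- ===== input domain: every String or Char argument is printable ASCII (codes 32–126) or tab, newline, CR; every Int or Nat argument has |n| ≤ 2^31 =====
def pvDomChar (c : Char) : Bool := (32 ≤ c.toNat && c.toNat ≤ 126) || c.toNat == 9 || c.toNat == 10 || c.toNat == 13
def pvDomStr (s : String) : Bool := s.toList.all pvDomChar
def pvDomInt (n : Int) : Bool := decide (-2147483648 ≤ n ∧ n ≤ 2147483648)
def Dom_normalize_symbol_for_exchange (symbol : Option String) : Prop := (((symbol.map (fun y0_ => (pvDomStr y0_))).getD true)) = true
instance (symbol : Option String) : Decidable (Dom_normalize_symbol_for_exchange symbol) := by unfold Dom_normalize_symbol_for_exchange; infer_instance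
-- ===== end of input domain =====

-- B fuses A's four .replace passes and the "__"-collapse while-loop into one pass with a prev-underscore flag (objective: simpler).

-- ===== PORT A =====
-- A-side helpers: one step of `normalized.replace("__", "_")`, characterized so that the
-- while-loop port below can cite a length-decrease lemma for termination.
def pvRstep : List Char → List Char
  | [] => []
  | [c] => [c]
  | c1 :: c2 :: t => if c1 = '_' ∧ c2 = '_' then '_' :: pvRstep t else c1 :: pvRstep (c2 :: t)

lemma pvGo2 (fuel : Nat) : ∀ (l acc : List Char), l.length ≤ fuel →
    PySem.Chars.replace.go ['_', '_'] ['_'] fuel l acc = acc.reverse ++ pvRstep l := by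
  induction fuel with
  | zero =>
    intro l acc h
    have : l = [] := by cases l <;> simp_all
    subst this; simp [PySem.Chars.replace.go, pvRstep]
  | succ n ih =>
    intro l acc h
    match l with
    | [] => simp [PySem.Chars.replace.go, pvRstep]
    | [c] =>
      have hp : List.isPrefixOf ['_', '_'] [c] = false := by simp [List.isPrefixOf]
      simp only [PySem.Chars.replace.go, hp, Bool.false_eq_true, if_false]
      rw [ih [] (c :: acc) (by simp)]
      simp [pvRstep]
    | c1 :: c2 :: t =>
      by_cases hdd : c1 = '_' ∧ c2 = '_'
      · obtain ⟨h1, h2⟩ := hdd; subst h1; subst h2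
        have hp : List.isPrefixOf ['_', '_'] ('_' :: '_' :: t) = true := by
          simp [List.isPrefixOf]
        simp only [PySem.Chars.replace.go, hp, if_true]
        rw [show List.drop (['_', '_'] : List Char).length ('_' :: '_' :: t) = t from rfl]
        rw [ih t (['_'].reverse ++ acc) (by simp at h ⊢; omega)]
        simp [pvRstep]
      · have hp : List.isPrefixOf ['_', '_'] (c1 :: c2 :: t) = false := by
          rcases not_and_or.mp hdd with h1 | h2
          · simp [List.isPrefixOf, beq_iff_eq]; intro he; exact absurd he.symm h1
          · simp [List.isPrefixOf, beq_iff_eq]; intro _ he; exact absurd he.symm h2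
        simp only [PySem.Chars.replace.go, hp, Bool.false_eq_true, if_false]
        rw [ih (c2 :: t) (c1 :: acc) (by simp at h ⊢; omega)]
        simp [pvRstep, hdd]

lemma pvReplaceDD (l : List Char) :
    PySem.Chars.replace l ['_', '_'] ['_'] = pvRstep l := by
  simp only [PySem.Chars.replace, List.isEmpty_cons, Bool.false_eq_true, if_false]
  rw [pvGo2 l.length l [] le_rfl]; rfl

def pvHasDD : List Char → Bool
  | c1 :: c2 :: t => if c1 = '_' ∧ c2 = '_' then true else pvHasDD (c2 :: t)
  | _ => false

lemma pvInfix_iff : ∀ (l : List Char), (['_', '_'] <:+: l) ↔ pvHasDD l = true := by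
  intro l
  induction l with
  | nil => simp [pvHasDD]
  | cons c t ih =>
    rw [List.infix_cons_iff]
    match t with
    | [] =>
      have h1 : ¬ (['_', '_'] <+: [c]) := fun hp => by have := hp.length_le; simp at this
      have h2 : ¬ (['_', '_'] <:+: ([] : List Char)) := fun hi => by have := hi.length_le; simp at this
      simp [pvHasDD, h1, h2]
    | c2 :: t2 =>
      constructor
      · rintro (hp | hi)
        · rcases List.cons_prefix_cons.mp hp with ⟨rfl, hp2⟩
          rcases List.cons_prefix_cons.mp hp2 with ⟨rfl, _⟩
          simp [pvHasDD]
        · have := ih.mp hi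
          simp only [pvHasDD]
          split
          · rfl
          · exact this
      · intro h
        simp only [pvHasDD] at h
        by_cases hdd : c = '_' ∧ c2 = '_'
        · left
          obtain ⟨rfl, rfl⟩ := hdd
          exact List.cons_prefix_cons.mpr ⟨rfl, List.cons_prefix_cons.mpr ⟨rfl, List.nil_prefix⟩⟩
        · right
          rw [if_neg hdd] at h
          exact ih.mpr h

lemma pvIsIn_eq (l : List Char) : PySem.Chars.isIn ['_', '_'] l = pvHasDD l := by
  rw [Bool.eq_iff_iff, PySem.Chars.isIn_iff_infix]
  exact pvInfix_iff l

lemma pvRstep_len_le : ∀ (l : List Char), (pvRstep l).length ≤ l.length := by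
  intro l
  induction l using pvRstep.induct with
  | case1 => simp [pvRstep]
  | case2 c => simp [pvRstep]
  | case3 c1 c2 t hdd ih => simp only [pvRstep, if_pos hdd, List.length_cons]; omega
  | case4 c1 c2 t hdd ih =>
    simp only [pvRstep, if_neg hdd]
    simp only [List.length_cons] at ih ⊢
    omega

lemma pvRstep_len : ∀ (l : List Char), pvHasDD l = true → (pvRstep l).length < l.length := by
  intro l
  induction l using pvRstep.induct with
  | case1 => simp [pvHasDD]
  | case2 c => simp [pvHasDD]
  | case3 c1 c2 t hdd ih =>
    intro _
    simp only [pvRstep, if_pos hdd, List.length_cons]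
    have := pvRstep_len_le t; omega
  | case4 c1 c2 t hdd ih =>
    intro h
    simp only [pvHasDD, if_neg hdd] at h
    simp only [pvRstep, if_neg hdd]
    have h2 := ih h
    simp only [List.length_cons] at h2 ⊢
    omega

lemma pvLoopDec (l : List Char) (h : PySem.Chars.isIn ['_', '_'] l = true) :
    (PySem.Chars.replace l ['_', '_'] ['_']).length < l.length := by
  rw [pvReplaceDD]
  exact pvRstep_len l (by rw [← pvIsIn_eq]; exact h)

-- `while "__" in normalized: normalized = normalized.replace("__", "_")`
def pvLoop (l : List Char) : List Char :=
  if h : PySem.Chars.isIn ['_', '_'] l = true then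
    pvLoop (PySem.Chars.replace l ['_', '_'] ['_'])
  else l
termination_by l.length
decreasing_by exact pvLoopDec l h

def normalize_symbol_for_exchange (symbol : Option String) : String :=
  match symbol with
  | none => ""
  | some s =>
    if s.toList = [] then ""
    else
      String.mk (pvLoop (PySem.Chars.replace (PySem.Chars.replace (PySem.Chars.replace
        (PySem.Chars.upper (PySem.Chars.strip s.toList)) ['/'] ['_']) ['-'] ['_']) [' '] []))

-- ===== PORT B =====
def normalize_symbol_for_exchange_alt (symbol : Option String) : String :=
  match symbol with
  | none => ""
  | some s =>
    if s.toList = [] then ""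
    else
      String.mk ((PySem.Chars.upper (PySem.Chars.strip s.toList)).foldl
        (fun st c =>
          if c = ' ' then st
          else
            let d := if c = '/' ∨ c = '-' then '_' else c
            if d = '_' ∧ st.2 = true then st else (st.1 ++ [d], decide (d = '_')))
        (([] : List Char), false)).1

-- ===== PRECONDITION & SPEC =====
def Spec_normalize_symbol_for_exchange (symbol : Option String) (out : String) : Prop := out = normalize_symbol_for_exchange_alt symbol
instance (symbol : Option String) (out : String) : Decidable (Spec_normalize_symbol_for_exchange symbol out) := by unfold Spec_normalize_symbol_for_exchange; infer_instance

-- ===== CLAIM (what is proved, stated in full; the proofs are below) =====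
def Claim_equal_normalize_symbol_for_exchange : Prop := ∀ (symbol : Option String), Dom_normalize_symbol_for_exchange symbol → Spec_normalize_symbol_for_exchange symbol (normalize_symbol_for_exchange symbol)

-- ===== LEMMAS AND PROOFS =====

-- per-character effect of A's three single-character replaces, combined
def pvG (c : Char) : List Char :=
  if c = ' ' then [] else [if c = '/' ∨ c = '-' then '_' else c]

-- the collapse pass: emit, but skip a '_' that directly follows an emitted '_'
def pvCollapse : Bool → List Char → List Char
  | _, [] => []
  | prev, c :: t =>
    if c = '_' then (if prev then pvCollapse true t else '_' :: pvCollapse true t)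
    else c :: pvCollapse false t

lemma pvGo1 (a : Char) (new : List Char) (fuel : Nat) : ∀ (l acc : List Char), l.length ≤ fuel →
    PySem.Chars.replace.go [a] new fuel l acc
      = acc.reverse ++ l.flatMap (fun c => if c = a then new else [c]) := by
  induction fuel with
  | zero =>
    intro l acc h
    have : l = [] := by cases l <;> simp_all
    subst this; simp [PySem.Chars.replace.go]
  | succ n ih =>
    intro l acc h
    match l with
    | [] => simp [PySem.Chars.replace.go]
    | c :: t =>
      by_cases hc : c = a
      · subst hc
        have hp : List.isPrefixOf [c] (c :: t) = true := by simp [List.isPrefixOf]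
        simp only [PySem.Chars.replace.go, hp, if_true]
        rw [show List.drop ([c] : List Char).length (c :: t) = t from rfl]
        rw [ih t _ (by simp at h ⊢; omega)]
        simp
      · have hp : List.isPrefixOf [a] (c :: t) = false := by
          simp [List.isPrefixOf, beq_iff_eq]; intro he; exact absurd he.symm hc
        simp only [PySem.Chars.replace.go, hp, Bool.false_eq_true, if_false]
        rw [ih t (c :: acc) (by simp at h ⊢; omega)]
        simp [hc]

lemma pvReplaceSingle (l : List Char) (a : Char) (new : List Char) :
    PySem.Chars.replace l [a] new = l.flatMap (fun c => if c = a then new else [c]) := by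
  simp only [PySem.Chars.replace, List.isEmpty_cons, Bool.false_eq_true, if_false]
  rw [pvGo1 a new l.length l [] le_rfl]; rfl

lemma pvChain (l : List Char) :
    PySem.Chars.replace (PySem.Chars.replace (PySem.Chars.replace l ['/'] ['_']) ['-'] ['_']) [' '] []
      = l.flatMap pvG := by
  rw [pvReplaceSingle, pvReplaceSingle, pvReplaceSingle]
  induction l with
  | nil => simp
  | cons c t ih =>
    simp only [List.flatMap_cons] at *
    rw [List.flatMap_append, List.flatMap_append, ih]
    congr 1
    by_cases h1 : c = '/' <;> by_cases h2 : c = '-' <;> by_cases h3 : c = ' ' <;>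
      simp_all [pvG]

lemma pvCollapse_head (prev : Bool) (c : Char) (x : List Char) :
    pvCollapse prev (c :: x)
      = (if c = '_' ∧ prev = true then [] else [c]) ++ pvCollapse (decide (c = '_')) x := by
  by_cases hc : c = '_'
  · subst hc
    cases prev <;> simp [pvCollapse]
  · simp [pvCollapse, hc]

lemma pvHasDD_tail (c : Char) (t : List Char) (h : pvHasDD (c :: t) = false) :
    pvHasDD t = false := by
  match t with
  | [] => rfl
  | c2 :: t2 =>
    simp only [pvHasDD] at h ⊢
    split at h
    · exact absurd h (by simp)
    · exact h

lemma pvCollapse_noDD : ∀ (l : List Char) (prev : Bool), pvHasDD l = false →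
    (prev = true → l.head? ≠ some '_') → pvCollapse prev l = l := by
  intro l
  induction l with
  | nil => intro prev _ _; rfl
  | cons c t ih =>
    intro prev hdd hhead
    have hem : ¬ (c = '_' ∧ prev = true) := by
      rintro ⟨rfl, hp⟩; exact hhead hp rfl
    rw [pvCollapse_head, if_neg hem, List.singleton_append]
    congr 1
    apply ih
    · exact pvHasDD_tail c t hdd
    · intro hdec hh
      have hc : c = '_' := by simpa using hdec
      subst hc
      cases t with
      | nil => simp at hh
      | cons c2 t2 =>
        have hc2 : c2 = '_' := by simpa using hh
        subst hc2
        simp [pvHasDD] at hdd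

lemma pvCollapse_rstep : ∀ (l : List Char) (prev : Bool),
    pvCollapse prev (pvRstep l) = pvCollapse prev l := by
  intro l
  induction l using pvRstep.induct with
  | case1 => intro prev; rfl
  | case2 c => intro prev; rfl
  | case3 c1 c2 t hdd ih =>
    intro prev
    simp only [pvRstep, if_pos hdd]
    obtain ⟨rfl, rfl⟩ := hdd
    rw [pvCollapse_head, pvCollapse_head, pvCollapse_head]
    rw [ih]
    simp
  | case4 c1 c2 t hdd ih =>
    intro prev
    simp only [pvRstep, if_neg hdd]
    rw [pvCollapse_head, pvCollapse_head, ih]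

lemma pvLoop_eq_collapse (l : List Char) : pvLoop l = pvCollapse false l := by
  induction l using pvLoop.induct with
  | case1 l h ih =>
    rw [pvLoop, dif_pos h, ih, pvReplaceDD, pvCollapse_rstep]
  | case2 l h =>
    rw [pvLoop, dif_neg h]
    rw [pvIsIn_eq] at h
    exact (pvCollapse_noDD l false (by simpa using h) (by simp)).symm

lemma pvFoldl_eq : ∀ (l : List Char) (acc : List Char) (prev : Bool),
    (l.foldl (fun st c =>
        if c = ' ' then st
        else
          let d := if c = '/' ∨ c = '-' then '_' else c
          if d = '_' ∧ st.2 = true then st else (st.1 ++ [d], decide (d = '_')))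
      (acc, prev)).1 = acc ++ pvCollapse prev (l.flatMap pvG) := by
  intro l
  induction l with
  | nil => intro acc prev; simp [pvCollapse]
  | cons c t ih =>
    intro acc prev
    simp only [List.foldl_cons, List.flatMap_cons]
    by_cases hsp : c = ' '
    · subst hsp
      rw [if_pos rfl, ih]
      simp [pvG]
    · rw [if_neg hsp]
      have hg : pvG c = [if c = '/' ∨ c = '-' then '_' else c] := by simp [pvG, hsp]
      rw [hg]
      set d := if c = '/' ∨ c = '-' then '_' else c with hd
      simp only [List.cons_append]
      rw [pvCollapse_head]
      by_cases hskip : d = '_' ∧ prev = true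
      · rw [if_pos hskip, if_pos hskip, ih]
        have : (decide (d = '_')) = prev := by rw [hskip.1, hskip.2]; simp
        rw [this]
        simp
      · rw [if_neg hskip, if_neg hskip, ih]
        simp

lemma pvMain (l : List Char) :
    pvLoop (PySem.Chars.replace (PySem.Chars.replace (PySem.Chars.replace l ['/'] ['_']) ['-'] ['_']) [' '] [])
      = (l.foldl (fun st c =>
          if c = ' ' then st
          else
            let d := if c = '/' ∨ c = '-' then '_' else c
            if d = '_' ∧ st.2 = true then st else (st.1 ++ [d], decide (d = '_')))
        (([] : List Char), false)).1 := by
  rw [pvChain, pvLoop_eq_collapse, pvFoldl_eq]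
  simp

-- ===== VERDICT (by name: the statement is the Claim_ definition above) =====
theorem normalize_symbol_for_exchange_spec : Claim_equal_normalize_symbol_for_exchange := by
  intro symbol _
  unfold Spec_normalize_symbol_for_exchange
  match symbol with
  | none => rfl
  | some s =>
    unfold normalize_symbol_for_exchange normalize_symbol_for_exchange_alt
    by_cases h : s.toList = []
    · simp [h]
    · simp only [h, if_false]
      rw [pvMain]
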